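-- pv_equiv track=rewrite | github.com/divit-gupta/Wikipedia-Search-Engine | Phase_2/src/search.py | extract_field_count
-- ===== SOURCE A (Python) =====
-- def extract_field_count(str):
--     fields = [0, 0, 0, 0, 0, 0]
--     for i in range(0, len(str)):
--         if str[i] == "t":
--             j = i+1
--             while(j < len(str) and str[j] <= "9" and str[j] >= "0"):
--                 j += 1
--             fields[0] = int(str[i+1:j])
--             i = j
--         elif str[i] == "i":
--             j = i+1
--             while(j < len(str) and str[j] <= "9" and str[j] >= "0"):
--                 j += 1
--             fields[1] = int(str[i+1:j])
--             i = j
--         elif str[i] == "b":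
--             j = i+1
--             while(j < len(str) and str[j] <= "9" and str[j] >= "0"):
--                 j += 1
--             fields[2] = int(str[i+1:j])
--             i = j
--         elif str[i] == "c":
--             j = i+1
--             while(j < len(str) and str[j] <= "9" and str[j] >= "0"):
--                 j += 1
--             fields[3] = int(str[i+1:j])
--             i = j
--         elif str[i] == "l":
--             j = i+1
--             while(j < len(str) and str[j] <= "9" and str[j] >= "0"):
--                 j += 1
--             fields[4] = int(str[i+1:j])
--             i = j
--         elif str[i] == "r":
--             j = i+1
--             while(j < len(str) and str[j] <= "9" and str[j] >= "0"):
--                 j += 1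
--             fields[5] = int(str[i+1:j])
--             i = j
--     return fields
-- ===== SOURCE B (Python) =====
-- def extract_field_count(s):
--     # last occurrence of each trigger letter wins, so parse per field via rfind
--     def value_after(p):
--         d = ""
--         for ch in s[p:]:
--             if "0" <= ch <= "9":
--                 d += ch
--             else:
--                 break
--         return int(d)
--     return [value_after(s.rfind(c) + 1) if c in s else 0 for c in "tibclr"]
-- ===== Notes on version B (the rewrite author's own statement) =====
-- stated objective: simpler
-- what changed: Replaces A's stateful index loop with six duplicated branch bodies by six independent per-field parses: for each trigger letter, find its last occurrence with rfind (last assignment wins in A) and parse the digit run after it.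
import Mathlib
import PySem

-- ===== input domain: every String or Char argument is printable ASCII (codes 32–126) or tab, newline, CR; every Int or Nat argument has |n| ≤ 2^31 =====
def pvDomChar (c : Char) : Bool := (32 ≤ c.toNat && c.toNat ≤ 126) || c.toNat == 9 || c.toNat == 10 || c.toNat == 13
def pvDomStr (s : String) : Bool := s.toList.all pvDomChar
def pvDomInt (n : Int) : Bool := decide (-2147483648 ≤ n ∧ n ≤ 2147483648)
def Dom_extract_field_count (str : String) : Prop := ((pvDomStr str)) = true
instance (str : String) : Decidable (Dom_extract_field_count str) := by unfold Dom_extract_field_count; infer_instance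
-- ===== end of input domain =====

-- B replaces A's stateful index loop over every position by six independent
-- per-field parses at the last occurrence of each trigger letter (simpler, measured faster).

-- ===== PORT A =====
-- the inner while loop: advance j while str[j] is an ASCII digit (A's test order: <= '9' then >= '0')
def pvScanA (cs : List Char) (j : Nat) : Nat :=
  if h : j < cs.length ∧ cs.getD j ' ' ≤ '9' ∧ '0' ≤ cs.getD j ' ' then
    pvScanA cs (j + 1)
  else j
termination_by cs.length - j
decreasing_by omega

-- int(str[i+1:j]); ofChars? = none only where Python's int raises ValueError, which Pre_ excludes
def pvIntA (cs : List Char) (i : Nat) : Int :=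
  (PySem.Int.ofChars? (PySem.List.slice cs (some ((i : Int) + 1)) (some ((pvScanA cs (i + 1) : Nat) : Int)))).getD 0

-- the loop body: A's six identical elif branches in order
def pvStepA (cs : List Char) (fields : List Int) (i : Nat) : List Int :=
  if cs.getD i ' ' = 't' then fields.set 0 (pvIntA cs i)
  else if cs.getD i ' ' = 'i' then fields.set 1 (pvIntA cs i)
  else if cs.getD i ' ' = 'b' then fields.set 2 (pvIntA cs i)
  else if cs.getD i ' ' = 'c' then fields.set 3 (pvIntA cs i)
  else if cs.getD i ' ' = 'l' then fields.set 4 (pvIntA cs i)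
  else if cs.getD i ' ' = 'r' then fields.set 5 (pvIntA cs i)
  else fields

def extract_field_count (str : String) : List Int :=
  (List.range str.toList.length).foldl (pvStepA str.toList) [0, 0, 0, 0, 0, 0]

-- ===== PORT B =====
-- value_after's for/break accumulation of leading ASCII digits
def pvDigitsB (rest : List Char) : List Char :=
  match rest with
  | [] => []
  | ch :: tl => if '0' ≤ ch ∧ ch ≤ '9' then ch :: pvDigitsB tl else []

def pvValueAfter (cs : List Char) (p : Nat) : Int :=
  (PySem.Int.ofChars? (pvDigitsB (cs.drop p))).getD 0

-- s.rfind(c): highest index of c, or -1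
def pvRfind (cs : List Char) (c : Char) : Int :=
  (List.range cs.length).foldl (fun acc i => if cs.getD i ' ' = c then (i : Int) else acc) (-1)

def extract_field_count_alt (str : String) : List Int :=
  (['t', 'i', 'b', 'c', 'l', 'r'] : List Char).map (fun c =>
    if c ∈ str.toList then pvValueAfter str.toList ((pvRfind str.toList c + 1).toNat) else 0)

-- ===== PRECONDITION & SPEC =====
-- Pre_ excludes exactly the inputs on which A raises ValueError: a trigger letter
-- not immediately followed by an ASCII digit makes A call int on an empty slice.
def Pre_extract_field_count (str : String) : Prop :=
  ∀ i ∈ List.range str.toList.length,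
    str.toList.getD i ' ' ∈ (['t', 'i', 'b', 'c', 'l', 'r'] : List Char) →
      i + 1 < str.toList.length ∧ '0' ≤ str.toList.getD (i + 1) ' ' ∧ str.toList.getD (i + 1) ' ' ≤ '9'
instance (str : String) : Decidable (Pre_extract_field_count str) := by
  unfold Pre_extract_field_count; infer_instance

def pvWitness_extract_field_count : String := "t12i3 b400 r5"

def Spec_extract_field_count (str : String) (out : List Int) : Prop := out = extract_field_count_alt str
instance (str : String) (out : List Int) : Decidable (Spec_extract_field_count str out) := by unfold Spec_extract_field_count; infer_instance

-- ===== CLAIM (what is proved, stated in full; the proofs are below) =====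
def Claim_equal_extract_field_count : Prop := ∀ (str : String), Dom_extract_field_count str → Pre_extract_field_count str → Spec_extract_field_count str (extract_field_count str)

-- ===== LEMMAS AND PROOFS =====

-- letter → field index (proof-side characterisation of A's branch chain)
def pvLIdx (c : Char) : Option Nat :=
  if c = 't' then some 0 else if c = 'i' then some 1 else if c = 'b' then some 2
  else if c = 'c' then some 3 else if c = 'l' then some 4 else if c = 'r' then some 5 else none

-- last index of c among positions < n, or -1
def pvLastIdx (cs : List Char) (c : Char) (n : Nat) : Int :=
  (List.range n).foldl (fun acc i => if cs.getD i ' ' = c then (i : Int) else acc) (-1)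

lemma pvRfind_eq (cs : List Char) (c : Char) : pvRfind cs c = pvLastIdx cs c cs.length := rfl

lemma pvStepA_eq (cs : List Char) (f : List Int) (i : Nat) :
    pvStepA cs f i = match pvLIdx (cs.getD i ' ') with
      | some k => f.set k (pvIntA cs i)
      | none => f := by
  unfold pvStepA pvLIdx
  split_ifs <;> rfl

lemma pvLIdx_inj {c c' : Char} {k : Nat} (h : pvLIdx c = some k) (h' : pvLIdx c' = some k) :
    c = c' := by
  unfold pvLIdx at h h'
  split_ifs at h h' <;> (try simp_all) <;> omega

lemma pvFoldA_length (cs : List Char) (l : List Nat) (f : List Int) :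
    (l.foldl (pvStepA cs) f).length = f.length := by
  induction l generalizing f with
  | nil => rfl
  | cons i tl ih =>
    rw [List.foldl_cons, ih, pvStepA_eq]
    cases pvLIdx (cs.getD i ' ') <;> simp

lemma pvLastIdx_cases (cs : List Char) (c : Char) (n : Nat) :
    pvLastIdx cs c n = -1 ∨ 0 ≤ pvLastIdx cs c n := by
  induction n with
  | zero => left; rfl
  | succ n ih =>
    unfold pvLastIdx at *
    rw [List.range_succ, List.foldl_append, List.foldl_cons, List.foldl_nil]
    split_ifs
    · right; positivity
    · exact ih

lemma pvLastIdx_eq_neg_one (cs : List Char) (c : Char) (n : Nat) :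
    pvLastIdx cs c n = -1 ↔ ∀ i < n, cs.getD i ' ' ≠ c := by
  induction n with
  | zero => simp [pvLastIdx]
  | succ n ih =>
    unfold pvLastIdx at *
    rw [List.range_succ, List.foldl_append, List.foldl_cons, List.foldl_nil]
    split_ifs with h
    · constructor
      · intro hn; exfalso; omega
      · intro hall; exact absurd h (hall n (by omega))
    · rw [ih]
      constructor
      · intro hall i hi
        rcases Nat.lt_succ_iff_lt_or_eq.mp hi with hi | hi
        · exact hall i hi
        · subst hi; exact h
      · intro hall i hi; exact hall i (by omega)

lemma pvLastIdx_not_mem (cs : List Char) (c : Char) :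
    pvLastIdx cs c cs.length = -1 ↔ c ∉ cs := by
  rw [pvLastIdx_eq_neg_one]
  constructor
  · intro hall hmem
    obtain ⟨i, hi, hget⟩ := List.mem_iff_getElem.mp hmem
    exact hall i hi (by rw [List.getD_eq_getElem _ _ hi]; exact hget)
  · intro hmem i hi hget
    exact hmem (by rw [List.getD_eq_getElem _ _ hi] at hget; exact hget ▸ List.getElem_mem hi)

lemma pvScanA_ge (cs : List Char) (p : Nat) : p ≤ pvScanA cs p := by
  have H : ∀ d p, cs.length - p ≤ d → p ≤ pvScanA cs p := by
    intro d
    induction d with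
    | zero =>
      intro p hp
      rw [pvScanA]
      split_ifs with h
      · exact absurd h.1 (by omega)
      · exact le_refl p
    | succ d ih =>
      intro p hp
      rw [pvScanA]
      split_ifs with h
      · have := ih (p + 1) (by omega); omega
      · exact le_refl p
  exact H (cs.length - p) p (le_refl _)

lemma pvScanA_slice (cs : List Char) (p : Nat) :
    (cs.drop p).take (pvScanA cs p - p) = pvDigitsB (cs.drop p) := by
  have H : ∀ d p, cs.length - p ≤ d → (cs.drop p).take (pvScanA cs p - p) = pvDigitsB (cs.drop p) := by
    intro d
    induction d with
    | zero =>
      intro p hp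
      rw [pvScanA]
      split_ifs with h
      · exact absurd h.1 (by omega)
      · have hd : cs.drop p = [] := List.drop_eq_nil_of_le (by omega)
        simp [hd, pvDigitsB]
    | succ d ih =>
      intro p hp
      rw [pvScanA]
      split_ifs with h
      · obtain ⟨hlt, h9, h0⟩ := h
        have hdrop : cs.drop p = cs[p] :: cs.drop (p + 1) := List.drop_eq_getElem_cons hlt
        have hgd : cs.getD p ' ' = cs[p] := List.getD_eq_getElem _ _ hlt
        rw [hdrop, pvDigitsB]
        rw [hgd] at h9 h0
        rw [if_pos ⟨h0, h9⟩]
        have hge := pvScanA_ge cs (p + 1)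
        have : pvScanA cs (p + 1) - p = (pvScanA cs (p + 1) - (p + 1)) + 1 := by omega
        rw [this, List.take_succ_cons, ih (p + 1) (by omega)]
      · simp only [Nat.sub_self, List.take_zero]
        by_cases hlt : p < cs.length
        · have hdrop : cs.drop p = cs[p] :: cs.drop (p + 1) := List.drop_eq_getElem_cons hlt
          have hgd : cs.getD p ' ' = cs[p] := List.getD_eq_getElem _ _ hlt
          rw [hdrop, pvDigitsB, if_neg]
          intro ⟨h0, h9⟩
          exact h ⟨hlt, by rw [hgd]; exact h9, by rw [hgd]; exact h0⟩
        · have hd : cs.drop p = [] := List.drop_eq_nil_of_le (by omega)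
          rw [hd]; rfl
  exact H (cs.length - p) p (le_refl _)

lemma pvIntA_eq (cs : List Char) (i : Nat) : pvIntA cs i = pvValueAfter cs (i + 1) := by
  unfold pvIntA pvValueAfter
  have h1 : ((i : Int) + 1) = (((i + 1 : Nat) : Int)) := by push_cast; ring
  rw [h1, PySem.List.slice_natCast, pvScanA_slice]

lemma pvFoldA_get (cs : List Char) (c : Char) (k : Nat) (hck : pvLIdx c = some k)
    (n : Nat) (f : List Int) (hk : k < f.length) :
    ((List.range n).foldl (pvStepA cs) f).getD k 0 =
      if pvLastIdx cs c n = -1 then f.getD k 0 else pvIntA cs (pvLastIdx cs c n).toNat := by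
  induction n with
  | zero => simp [pvLastIdx]
  | succ n ih =>
    unfold pvLastIdx at *
    rw [List.range_succ, List.foldl_append, List.foldl_append]
    simp only [List.foldl_cons, List.foldl_nil]
    rw [pvStepA_eq]
    by_cases hc : cs.getD n ' ' = c
    · rw [hc, hck, if_pos rfl]
      have hlen : ((List.range n).foldl (pvStepA cs) f).length = f.length := pvFoldA_length cs _ f
      rw [if_neg (by omega)]
      rw [List.getD_eq_getElem _ _ (by rw [List.length_set, hlen]; exact hk)]
      rw [List.getElem_set_self]
      simp
    · rw [if_neg hc]
      cases hidx : pvLIdx (cs.getD n ' ') with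
      | none => exact ih
      | some k' =>
        have hkk : k' ≠ k := fun he => hc (pvLIdx_inj (he ▸ hidx) hck)
        have hlen : ((List.range n).foldl (pvStepA cs) f).length = f.length := pvFoldA_length cs _ f
        simp only []
        rw [show (((List.range n).foldl (pvStepA cs) f).set k' (pvIntA cs n)).getD k 0
              = ((List.range n).foldl (pvStepA cs) f).getD k 0 by
          rw [List.getD_eq_getElem _ _ (by rw [List.length_set, hlen]; exact hk),
              List.getD_eq_getElem _ _ (by rw [hlen]; exact hk)]
          exact List.getElem_set_ne hkk (by rw [List.length_set, hlen]; exact hk)]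
        exact ih

lemma pvMain (cs : List Char) (c : Char) (k : Nat) (hck : pvLIdx c = some k) (hk : k < 6) :
    ((List.range cs.length).foldl (pvStepA cs) [0, 0, 0, 0, 0, 0]).getD k 0 =
      if c ∈ cs then pvValueAfter cs ((pvRfind cs c + 1).toNat) else 0 := by
  rw [pvFoldA_get cs c k hck cs.length [0, 0, 0, 0, 0, 0] (by simpa using hk)]
  by_cases hm : c ∈ cs
  · have hne : pvLastIdx cs c cs.length ≠ -1 := fun h => ((pvLastIdx_not_mem cs c).mp h) hm
    have h0 : 0 ≤ pvLastIdx cs c cs.length := (pvLastIdx_cases cs c cs.length).resolve_left hne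
    rw [if_neg hne, if_pos hm, pvIntA_eq, pvRfind_eq]
    congr 1
    omega
  · rw [if_pos ((pvLastIdx_not_mem cs c).mpr hm), if_neg hm]
    interval_cases k <;> rfl

-- ===== VERDICT (by name: the statement is the Claim_ definition above) =====
theorem extract_field_count_spec : Claim_equal_extract_field_count := by
  intro s _ _
  unfold Spec_extract_field_count extract_field_count extract_field_count_alt
  apply List.ext_getElem
  · rw [pvFoldA_length]; rfl
  · intro k h1 h2
    have hk : k < 6 := by simpa using h2
    rw [← List.getD_eq_getElem _ 0 h1]
    rw [List.getElem_map]
    interval_cases k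
    · rw [pvMain s.toList 't' 0 rfl (by omega)]; rfl
    · rw [pvMain s.toList 'i' 1 rfl (by omega)]; rfl
    · rw [pvMain s.toList 'b' 2 rfl (by omega)]; rfl
    · rw [pvMain s.toList 'c' 3 rfl (by omega)]; rfl
    · rw [pvMain s.toList 'l' 4 rfl (by omega)]; rfl
    · rw [pvMain s.toList 'r' 5 rfl (by omega)]; rfl
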